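-- pv_equiv track=rewrite | github.com/kumass2020/CodeTest | 프로그래머스/2/389479. 서버 증설 횟수/서버 증설 횟수.py | solution
-- ===== SOURCE A (Python) =====
-- def solution(players, m, k):
--     answer = 0
--
--     server_expansion = []
--
--     for i, player in enumerate(players):
--         handled_player = 0
--         if i >= 1:
--             for j in range(i-1, max(-1, i-k), -1):
--                 handled_player += server_expansion[j] * m
--
--         player -= handled_player
--         player = player if player >= 0 else 0
--         server_expansion.append(player // m)
--
--
--     answer = sum(server_expansion)
--     return answer
-- ===== SOURCE B (Python) =====
-- def solution(players, m, k):
--     exp = []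
--     window = 0  # sum of the last min(k-1, i) expansions (those still covering index i)
--     total = 0
--     for i, p in enumerate(players):
--         e = max(p - window * m, 0) // m
--         exp.append(e)
--         total += e
--         if k >= 2:
--             window += e
--             j = i - k + 1
--             if j >= 0:
--                 window -= exp[j]
--     return total
-- ===== Notes on version B (the rewrite author's own statement) =====
-- stated objective: faster
-- what changed: B replaces A's O(k) inner rescan of the last k-1 expansions at every index by an incrementally maintained sliding-window sum plus a running total, computed in one pass.
-- outside the precondition, e.g. on solution([3, 4], 0, 2): A raises ZeroDivisionError, B raises ZeroDivisionError
import Mathlib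
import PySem

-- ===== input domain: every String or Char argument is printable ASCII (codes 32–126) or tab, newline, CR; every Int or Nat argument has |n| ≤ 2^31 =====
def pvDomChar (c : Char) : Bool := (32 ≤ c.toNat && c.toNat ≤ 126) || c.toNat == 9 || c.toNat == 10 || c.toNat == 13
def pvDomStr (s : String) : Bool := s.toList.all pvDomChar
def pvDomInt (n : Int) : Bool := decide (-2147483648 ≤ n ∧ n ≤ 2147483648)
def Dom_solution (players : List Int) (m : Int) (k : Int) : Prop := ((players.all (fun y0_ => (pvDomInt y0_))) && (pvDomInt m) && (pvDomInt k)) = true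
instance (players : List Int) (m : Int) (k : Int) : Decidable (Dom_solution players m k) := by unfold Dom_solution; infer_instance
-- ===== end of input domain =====

-- B replaces A's O(n·k) inner rescan of the last k-1 expansions by an incrementally
-- maintained sliding-window sum and a running total (objective: faster, O(n)).

-- ===== PORT A =====
-- loop body of A's for-loop (state: the server_expansion list)
def solutionStepA (m k : Int) (se : List Int) (ip : Int × Int) : List Int :=
  let i := ip.1
  let player := ip.2
  let handled_player : Int :=
    if i ≥ 1 then
      (PySem.List.pyRange (i-1) (max (-1) (i-k)) (-1)).foldl
        (fun h j => h + PySem.List.pyGetD se j 0 * m) 0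
    else 0
  let player := player - handled_player
  let player := if player ≥ 0 then player else 0
  se ++ [PySem.Int.floordiv player m]

def solution (players : List Int) (m : Int) (k : Int) : Int :=
  ((PySem.List.enumerate players 0).foldl (solutionStepA m k) []).sum

-- ===== PORT B =====
-- loop body of B's for-loop (state: exp list, window sum, running total)
def solutionStepB (m k : Int) (st : List Int × Int × Int) (ip : Int × Int) : List Int × Int × Int :=
  let exp := st.1
  let window := st.2.1
  let total := st.2.2
  let i := ip.1
  let p := ip.2
  let e := PySem.Int.floordiv (max (p - window * m) 0) m
  let exp := exp ++ [e]
  let total := total + e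
  if k ≥ 2 then
    let window := window + e
    let j := i - k + 1
    if 0 ≤ j then (exp, window - PySem.List.pyGetD exp j 0, total)
    else (exp, window, total)
  else (exp, window, total)

def solution_alt (players : List Int) (m : Int) (k : Int) : Int :=
  ((PySem.List.enumerate players 0).foldl (solutionStepB m k) ([], 0, 0)).2.2

-- ===== PRECONDITION & SPEC =====
-- A raises ZeroDivisionError when m = 0 (so does B); Pre_ excludes exactly that.
def Pre_solution (players : List Int) (m : Int) (k : Int) : Prop := m ≠ 0
instance (players : List Int) (m : Int) (k : Int) : Decidable (Pre_solution players m k) := by unfold Pre_solution; infer_instance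
def pvWitness_solution : List Int × Int × Int := ([10, 7, 0, 5], 3, 2)

def Spec_solution (players : List Int) (m : Int) (k : Int) (out : Int) : Prop := out = solution_alt players m k
instance (players : List Int) (m : Int) (k : Int) (out : Int) : Decidable (Spec_solution players m k out) := by unfold Spec_solution; infer_instance

-- ===== CLAIM (what is proved, stated in full; the proofs are below) =====
def Claim_equal_solution : Prop := ∀ (players : List Int) (m : Int) (k : Int), Dom_solution players m k → Pre_solution players m k → Spec_solution players m k (solution players m k)

-- ===== LEMMAS AND PROOFS =====

-- the window B maintains: the sum of the last min(k-1, len) expansions (0 unless k ≥ 2)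
def wspec (k : Int) (se : List Int) : Int :=
  if 2 ≤ k then (se.drop (se.length - (k - 1).toNat)).sum else 0

-- A's inner rescan computes wspec · m
lemma handled_eq_wspec (m k : Int) (se : List Int) (hi : (1 : Int) ≤ (se.length : Int)) :
    (PySem.List.pyRange ((se.length : Int) - 1) (max (-1) ((se.length : Int) - k)) (-1)).foldl
      (fun h j => h + PySem.List.pyGetD se j 0 * m) 0
    = wspec k se * m := by
  rw [PySem.List.pyRange_neg_one_eq_reverse]
  have h1 : max (-1) ((se.length : Int) - k) + 1 = max 0 ((se.length : Int) - k + 1) := by omega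
  have h2 : ((se.length : Int) - 1) + 1 = (se.length : Int) := by ring
  rw [h1, h2, PySem.List.foldl_add, List.map_reverse, List.sum_reverse,
      List.sum_map_mul_right,
      show ((se.length : Int)) = PySem.List.len se from rfl,
      PySem.List.map_pyGetD_pyRange se 0 (le_max_left _ _)]
  simp only [PySem.List.len]
  unfold wspec
  by_cases hk : 2 ≤ k
  · rw [if_pos hk]
    have : (max 0 ((se.length : Int) - k + 1)).toNat = se.length - (k - 1).toNat := by omega
    rw [this]; ring
  · rw [if_neg hk]
    have hz : se.drop (max 0 ((se.length : Int) - k + 1)).toNat = [] :=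
      List.drop_eq_nil_of_le (by omega)
    rw [hz]; simp

-- how the window changes when one expansion is appended
lemma wspec_append (k e : Int) (se : List Int) :
    wspec k (se ++ [e]) =
      if k ≥ 2 then
        (if 0 ≤ (se.length : Int) - k + 1
         then wspec k se + e - PySem.List.pyGetD (se ++ [e]) ((se.length : Int) - k + 1) 0
         else wspec k se + e)
      else wspec k se := by
  unfold wspec
  simp only [List.length_append, List.length_cons, List.length_nil, ge_iff_le]
  by_cases hk : 2 ≤ k
  · rw [if_pos hk, if_pos hk, if_pos hk]
    by_cases hj : 0 ≤ (se.length : Int) - k + 1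
    · rw [if_pos hj]
      have hKn : (k - 1).toNat ≤ se.length := by omega
      have hK1 : 1 ≤ (k - 1).toNat := by omega
      have hlt : se.length - (k - 1).toNat < se.length := by omega
      have hget : PySem.List.pyGetD (se ++ [e]) ((se.length : Int) - k + 1) 0
          = se[se.length - (k - 1).toNat]'hlt := by
        have hidx : ((se.length : Int) - k + 1) = ((se.length - (k - 1).toNat : Nat) : Int) := by
          omega
        rw [hidx, PySem.List.pyGetD_natCast, List.getD_eq_getElem?_getD,
            List.getElem?_append_left hlt, List.getElem?_eq_getElem hlt, Option.getD_some]
      have hd1 : (se ++ [e]).drop (se.length + 1 - (k - 1).toNat)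
          = se.drop (se.length + 1 - (k - 1).toNat) ++ [e] :=
        List.drop_append_of_le_length (by omega)
      have hd2 : se.drop (se.length - (k - 1).toNat)
          = se[se.length - (k - 1).toNat]'hlt :: se.drop (se.length - (k - 1).toNat + 1) :=
        List.drop_eq_getElem_cons hlt
      have hidx2 : se.length - (k - 1).toNat + 1 = se.length + 1 - (k - 1).toNat := by omega
      rw [hget, hd1, List.sum_append, List.sum_singleton, hd2, List.sum_cons, ← hidx2]
      ring
    · rw [if_neg hj]
      have ha : se.length + 1 - (k - 1).toNat = 0 := by omega
      have hb : se.length - (k - 1).toNat = 0 := by omega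
      rw [ha, hb, List.drop_zero, List.drop_zero, List.sum_append, List.sum_singleton]
  · rw [if_neg hk, if_neg hk, if_neg hk]

-- one step of B from a coherent state mirrors one step of A
lemma step_eq (m k : Int) (se : List Int) (t p : Int) :
    solutionStepB m k (se, wspec k se, t) ((se.length : Int), p)
    = (solutionStepA m k se ((se.length : Int), p),
       wspec k (solutionStepA m k se ((se.length : Int), p)),
       t + (solutionStepA m k se ((se.length : Int), p)).sum - se.sum) := by
  unfold solutionStepA solutionStepB
  have hhandled : (if ((se.length : Int)) ≥ 1 then
      (PySem.List.pyRange ((se.length : Int) - 1) (max (-1) ((se.length : Int) - k)) (-1)).foldl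
        (fun h j => h + PySem.List.pyGetD se j 0 * m) 0
    else 0) = wspec k se * m := by
    by_cases hn : ((se.length : Int)) ≥ 1
    · rw [if_pos hn, handled_eq_wspec m k se hn]
    · rw [if_neg hn]
      have hnil : se = [] := by
        cases se with
        | nil => rfl
        | cons a l => simp at hn
      subst hnil; simp [wspec]
  simp only [hhandled]
  have hmax : max (p - wspec k se * m) 0
      = (if p - wspec k se * m ≥ 0 then p - wspec k se * m else 0) := by
    split_ifs with h <;> omega
  simp only [hmax]
  rw [wspec_append]
  simp only [List.sum_append, List.sum_singleton, ge_iff_le]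
  split_ifs with h1 h2 <;> simp only [Prod.mk.injEq] <;>
    and_intros <;> first | trivial | ring

-- the whole loops, generalized over the already-processed prefix
lemma loop_eq (m k : Int) (ps : List Int) : ∀ (se : List Int) (t : Int),
    (PySem.List.enumerate ps (se.length : Int)).foldl (solutionStepB m k) (se, wspec k se, t)
    = (((PySem.List.enumerate ps (se.length : Int)).foldl (solutionStepA m k) se),
       wspec k ((PySem.List.enumerate ps (se.length : Int)).foldl (solutionStepA m k) se),
       t + ((PySem.List.enumerate ps (se.length : Int)).foldl (solutionStepA m k) se).sum - se.sum) := by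
  induction ps with
  | nil =>
    intro se t
    simp [PySem.List.enumerate_nil]
  | cons p ps ih =>
    intro se t
    rw [PySem.List.enumerate_cons]
    simp only [List.foldl_cons]
    rw [step_eq]
    have hlen : ((solutionStepA m k se ((se.length : Int), p)).length : Int)
        = (se.length : Int) + 1 := by
      unfold solutionStepA; simp
    rw [← hlen, ih]
    simp only [Prod.mk.injEq]
    and_intros <;> first | trivial | ring

-- ===== VERDICT (by name: the statement is the Claim_ definition above) =====
theorem solution_spec : Claim_equal_solution := by
  intro players m k _ _
  unfold Spec_solution solution solution_alt
  have h := loop_eq m k players [] 0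
  have hw : wspec k [] = 0 := by simp [wspec]
  rw [hw] at h
  simp only [List.length_nil, Nat.cast_zero, List.sum_nil] at h
  rw [h]
  ring
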